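-- pv_equiv track=rewrite | github.com/lilizero123/AstraQuant-Platform | core/utils/stock.py | normalize_stock_code
-- ===== SOURCE A (Python) =====
-- def normalize_stock_code(code: str) -> str:
--     """
--     将输入的股票代码标准化为 6 位数字:
--     - 忽略前缀 sh/sz（不区分大小写）
--     - 移除空格、点、短横等符号
--     """
--     if not code:
--         return ""
--     value = (
--         code.strip()
--         .replace(".", "")
--         .replace("-", "")
--         .replace(" ", "")
--         .lower()
--     )
--     if len(value) >= 8 and value[:2] in {"sh", "sz"}:
--         value = value[2:]
--     digits = "".join(ch for ch in value if ch.isdigit())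
--     return digits[:6] if len(digits) >= 6 else digits
-- ===== SOURCE B (Python) =====
-- def normalize_stock_code(code: str) -> str:
--     return "".join(ch for ch in code if ch.isdigit())[:6]
-- ===== Notes on version B (the rewrite author's own statement) =====
-- stated objective: simpler
-- what changed: Replaces A's strip/replace/replace/replace/lower pipeline, the sh/sz prefix branch and the final length-6 case split by a single pass that keeps the first six digit characters of the input, since every step of A only removes or case-maps non-digit characters that the final digit filter discards anyway.
import Mathlib
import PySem

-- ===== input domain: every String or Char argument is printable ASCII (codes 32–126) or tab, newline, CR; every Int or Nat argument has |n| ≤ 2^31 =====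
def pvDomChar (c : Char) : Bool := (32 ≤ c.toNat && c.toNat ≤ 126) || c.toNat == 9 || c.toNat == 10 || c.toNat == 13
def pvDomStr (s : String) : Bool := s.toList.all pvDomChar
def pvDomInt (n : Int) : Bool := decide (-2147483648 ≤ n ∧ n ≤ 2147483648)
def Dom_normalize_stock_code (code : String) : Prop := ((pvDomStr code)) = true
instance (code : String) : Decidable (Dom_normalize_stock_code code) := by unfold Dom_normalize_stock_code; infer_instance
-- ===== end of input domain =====

-- B keeps the first six digit characters of the input in one pass; A's strip/replace/lower
-- pipeline and its sh/sz-prefix branch only touch non-digit characters, so the results agree.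

-- ===== PORT A =====
def normalize_stock_code (code : String) : String :=
  if code = "" then ""
  else
    let value :=
      PySem.Chars.lower
        (PySem.Chars.replace
          (PySem.Chars.replace
            (PySem.Chars.replace (PySem.Chars.strip code.toList) ['.'] [])
            ['-'] [])
          [' '] [])
    let value :=
      if 8 ≤ value.length ∧
          (PySem.Chars.slice value none (some 2) = ['s', 'h'] ∨
           PySem.Chars.slice value none (some 2) = ['s', 'z']) then
        PySem.Chars.slice value (some 2) none
      else value
    let digits := value.filter PySem.Chars.isdigit
    if 6 ≤ digits.length then String.ofList (PySem.Chars.slice digits none (some 6))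
    else String.ofList digits

-- ===== PORT B =====
def normalize_stock_code_alt (code : String) : String :=
  String.ofList (PySem.List.slice (code.toList.filter PySem.Chars.isdigit) none (some 6))

-- ===== PRECONDITION & SPEC =====
def Spec_normalize_stock_code (code : String) (out : String) : Prop := out = normalize_stock_code_alt code
instance (code : String) (out : String) : Decidable (Spec_normalize_stock_code code out) := by unfold Spec_normalize_stock_code; infer_instance

-- ===== CLAIM (what is proved, stated in full; the proofs are below) =====
def Claim_equal_normalize_stock_code : Prop := ∀ (code : String), Dom_normalize_stock_code code → Spec_normalize_stock_code code (normalize_stock_code code)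

-- ===== LEMMAS AND PROOFS =====

lemma isdigit_iff (c : Char) : PySem.Chars.isdigit c = true ↔ 48 ≤ c.toNat ∧ c.toNat ≤ 57 := by
  simp only [PySem.Chars.isdigit, Char.le_def, UInt32.le_iff_toNat_le, Char.toNat_val,
    Bool.and_eq_true, decide_eq_true_eq]
  have h0 : '0'.toNat = 48 := rfl
  have h9 : '9'.toNat = 57 := rfl
  omega

lemma isupper_iff (c : Char) : PySem.Chars.isupper c = true ↔ 65 ≤ c.toNat ∧ c.toNat ≤ 90 := by
  simp only [PySem.Chars.isupper, Char.le_def, UInt32.le_iff_toNat_le, Char.toNat_val,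
    Bool.and_eq_true, decide_eq_true_eq]
  have hA : 'A'.toNat = 65 := rfl
  have hZ : 'Z'.toNat = 90 := rfl
  omega

-- a char that Python counts as whitespace is not a decimal digit
lemma isdigit_of_isspace (c : Char) (h : PySem.Chars.isspace c = true) :
    PySem.Chars.isdigit c = false := by
  rw [Bool.eq_false_iff, Ne, isdigit_iff]
  simp only [PySem.Chars.isspace, Bool.or_eq_true, Bool.and_eq_true, decide_eq_true_eq] at h
  omega

-- filtering by p ignores a dropWhile by a p-false predicate
lemma filter_dropWhile (p q : Char → Bool) (h : ∀ c, q c = true → p c = false) (l : List Char) :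
    (l.dropWhile q).filter p = l.filter p := by
  induction l with
  | nil => rfl
  | cons c t ih =>
    by_cases hq : q c = true
    · simp [hq, ih, h c hq]
    · simp [hq]

lemma filter_strip (p : Char → Bool) (h : ∀ c, PySem.Chars.isspace c = true → p c = false)
    (l : List Char) : (PySem.Chars.strip l).filter p = l.filter p := by
  unfold PySem.Chars.strip PySem.Chars.rstrip PySem.Chars.lstrip
  rw [List.filter_reverse, filter_dropWhile p _ h, List.filter_reverse, List.reverse_reverse,
    filter_dropWhile p _ h]

-- replacing a non-p single character by "" does not change the p-filter
lemma filter_replace_go (p : Char → Bool) (c0 : Char) (hc : p c0 = false)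
    (fuel : Nat) (l acc : List Char) :
    (PySem.Chars.replace.go [c0] [] fuel l acc).filter p =
      (acc.filter p).reverse ++ l.filter p := by
  induction fuel generalizing l acc with
  | zero => simp [PySem.Chars.replace.go, List.filter_reverse]
  | succ n ih =>
    cases l with
    | nil => simp [PySem.Chars.replace.go, List.filter_reverse]
    | cons c t =>
      by_cases hpre : List.isPrefixOf [c0] (c :: t) = true
      · have hc0 : c = c0 := by
          simp [List.isPrefixOf] at hpre; exact hpre.symm
        simp only [PySem.Chars.replace.go, hpre, if_pos]
        rw [ih]
        simp [hc0, hc]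
      · simp only [PySem.Chars.replace.go, hpre, if_neg, Bool.not_eq_true]
        rw [ih]
        by_cases hp : p c = true <;> simp [hp]

lemma filter_replace (p : Char → Bool) (c0 : Char) (hc : p c0 = false) (l : List Char) :
    (PySem.Chars.replace l [c0] []).filter p = l.filter p := by
  unfold PySem.Chars.replace
  simp [filter_replace_go p c0 hc]

-- lowering does not change which chars are digits, nor the digits themselves
lemma isdigit_lowerChar (c : Char) :
    PySem.Chars.isdigit (PySem.Chars.lowerChar c) = PySem.Chars.isdigit c := by
  unfold PySem.Chars.lowerChar
  by_cases h : PySem.Chars.isupper c = true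
  · rw [if_pos h]
    have hu := (isupper_iff c).mp h
    have hv : (c.toNat + 32).isValidChar := Or.inl (by omega)
    have ht : (Char.ofNat (c.toNat + 32)).toNat = c.toNat + 32 := by
      rw [Char.toNat_ofNat, if_pos hv]
    have h1 : PySem.Chars.isdigit (Char.ofNat (c.toNat + 32)) = false := by
      rw [Bool.eq_false_iff, Ne, isdigit_iff, ht]; omega
    have h2 : PySem.Chars.isdigit c = false := by
      rw [Bool.eq_false_iff, Ne, isdigit_iff]; omega
    rw [h1, h2]
  · rw [if_neg h]

lemma lowerChar_of_isdigit (c : Char) (h : PySem.Chars.isdigit c = true) :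
    PySem.Chars.lowerChar c = c := by
  unfold PySem.Chars.lowerChar
  rw [if_neg]
  rw [isdigit_iff] at h
  rw [isupper_iff]
  omega

lemma filter_isdigit_lower (l : List Char) :
    (PySem.Chars.lower l).filter PySem.Chars.isdigit = l.filter PySem.Chars.isdigit := by
  induction l with
  | nil => rfl
  | cons c t ih =>
    simp only [PySem.Chars.lower, List.map_cons, List.filter_cons, isdigit_lowerChar] at *
    by_cases h : PySem.Chars.isdigit c = true
    · simp [h, lowerChar_of_isdigit c h, ih]
    · simp only [Bool.not_eq_true] at h
      simp [h, ih]

-- the whole pipeline of A preserves the digit subsequence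
lemma filter_pipeline (l : List Char) :
    (PySem.Chars.lower
      (PySem.Chars.replace
        (PySem.Chars.replace
          (PySem.Chars.replace (PySem.Chars.strip l) ['.'] []) ['-'] []) [' '] [])).filter
      PySem.Chars.isdigit = l.filter PySem.Chars.isdigit := by
  rw [filter_isdigit_lower,
    filter_replace _ _ (by decide), filter_replace _ _ (by decide),
    filter_replace _ _ (by decide), filter_strip _ isdigit_of_isspace]

lemma slice_to_two (xs : List Char) : PySem.List.slice xs none (some 2) = xs.take 2 := by
  rw [PySem.List.slice_to xs (by norm_num)]; rfl

lemma slice_to_six (xs : List Char) : PySem.List.slice xs none (some 6) = xs.take 6 := by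
  rw [PySem.List.slice_to xs (by norm_num)]; rfl

lemma slice_from_two (xs : List Char) : PySem.List.slice xs (some 2) none = xs.drop 2 := by
  rw [PySem.List.slice_from xs (by norm_num)]; rfl

-- ===== VERDICT (by name: the statement is the Claim_ definition above) =====
theorem normalize_stock_code_spec : Claim_equal_normalize_stock_code := by
  intro code _
  unfold Spec_normalize_stock_code normalize_stock_code normalize_stock_code_alt
  by_cases hc : code = ""
  · subst hc; rfl
  · rw [if_neg hc]
    simp only [PySem.Chars.slice_eq_listSlice, slice_to_two, slice_to_six, slice_from_two]
    set value := PySem.Chars.lower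
      (PySem.Chars.replace
        (PySem.Chars.replace
          (PySem.Chars.replace (PySem.Chars.strip code.toList) ['.'] []) ['-'] []) [' '] [])
      with hval
    have hfil : value.filter PySem.Chars.isdigit = code.toList.filter PySem.Chars.isdigit := by
      rw [hval, filter_pipeline]
    split_ifs with h8 h6 h6
    · -- prefix branch taken, ≥ 6 digits
      obtain ⟨-, h2⟩ := h8
      have hv : value = value.take 2 ++ value.drop 2 := (List.take_append_drop 2 value).symm
      have hfd : (value.drop 2).filter PySem.Chars.isdigit =
          code.toList.filter PySem.Chars.isdigit := by
        rw [← hfil]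
        conv_rhs => rw [hv]
        rw [List.filter_append]
        rcases h2 with h2 | h2 <;> rw [h2] <;>
          simp [(by decide : PySem.Chars.isdigit 's' = false),
            (by decide : PySem.Chars.isdigit 'h' = false),
            (by decide : PySem.Chars.isdigit 'z' = false)]
      rw [hfd]
    · -- prefix branch taken, < 6 digits
      obtain ⟨-, h2⟩ := h8
      have hv : value = value.take 2 ++ value.drop 2 := (List.take_append_drop 2 value).symm
      have hfd : (value.drop 2).filter PySem.Chars.isdigit =
          code.toList.filter PySem.Chars.isdigit := by
        rw [← hfil]
        conv_rhs => rw [hv]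
        rw [List.filter_append]
        rcases h2 with h2 | h2 <;> rw [h2] <;>
          simp [(by decide : PySem.Chars.isdigit 's' = false),
            (by decide : PySem.Chars.isdigit 'h' = false),
            (by decide : PySem.Chars.isdigit 'z' = false)]
      rw [← hfd, List.take_of_length_le (by omega)]
    · rw [hfil]
    · rw [← hfil, List.take_of_length_le (by omega)]
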